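-- pv_equiv track=rewrite | github.com/time4ruin/kjh | arm/kj13_bitflip_pmu/flip.py | _emit_nops
-- ===== SOURCE A (Python) =====
-- MAX_NOP_PER_BLOCK = 8000
--
-- def _emit_nops(n: int) -> str:
--     blocks = []
--     remaining = max(0, int(n))
--     while remaining > 0:
--         chunk = min(remaining, MAX_NOP_PER_BLOCK)
--         blocks.append(f"NOP_REPEAT({chunk});")
--         remaining -= chunk
--     if not blocks:
--         return "\n\t"
--     return "\n\t" + "\n\t".join(blocks) + "\n\t"
-- ===== SOURCE B (Python) =====
-- MAX_NOP_PER_BLOCK = 8000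
--
-- def _emit_nops(n: int) -> str:
--     remaining = max(0, int(n))
--     q, r = divmod(remaining, MAX_NOP_PER_BLOCK)
--     blocks = [f"NOP_REPEAT({MAX_NOP_PER_BLOCK});"] * q
--     if r > 0:
--         blocks.append(f"NOP_REPEAT({r});")
--     if not blocks:
--         return "\n\t"
--     return "\n\t" + "\n\t".join(blocks) + "\n\t"
-- ===== Notes on version B (the rewrite author's own statement) =====
-- stated objective: simpler
-- what changed: Replaces the repeated-subtraction while loop that appends one chunk per iteration with a single divmod: the quotient gives full-size blocks via list repetition and the remainder gives at most one final block.
import Mathlib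
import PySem

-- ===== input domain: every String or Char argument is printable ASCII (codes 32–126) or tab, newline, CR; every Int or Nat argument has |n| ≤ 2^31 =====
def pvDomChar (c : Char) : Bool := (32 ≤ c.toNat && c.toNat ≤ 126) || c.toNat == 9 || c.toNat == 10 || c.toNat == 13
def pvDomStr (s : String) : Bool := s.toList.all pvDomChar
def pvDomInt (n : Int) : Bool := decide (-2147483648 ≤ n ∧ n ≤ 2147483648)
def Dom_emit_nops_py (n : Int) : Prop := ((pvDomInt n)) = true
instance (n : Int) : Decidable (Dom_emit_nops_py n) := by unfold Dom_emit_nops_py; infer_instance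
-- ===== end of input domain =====

-- B replaces A's repeated-subtraction while loop with one divmod: q full blocks by
-- list repetition plus at most one remainder block (simpler decomposition, same cost).


-- ===== PORT A =====
-- the f-string f"NOP_REPEAT({chunk});"
def nopBlock (chunk : Int) : String := "NOP_REPEAT(" ++ PySem.Int.toStr chunk ++ ");"

-- the while loop: append one chunk per iteration, subtract it from remaining
def emitLoop (blocks : List String) (remaining : Int) : List String :=
  if remaining > 0 then
    emitLoop (blocks ++ [nopBlock (min remaining 8000)]) (remaining - min remaining 8000)
  else blocks
termination_by remaining.toNat
decreasing_by omega

def emit_nops_py (n : Int) : String :=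
  let blocks := emitLoop [] (max 0 n)
  if blocks = [] then "\n\t"
  else "\n\t" ++ PySem.Str.join "\n\t" blocks ++ "\n\t"

-- ===== PORT B =====
def emit_nops_py_alt (n : Int) : String :=
  let remaining := max 0 n
  let q := PySem.Int.floordiv remaining 8000
  let r := PySem.Int.mod remaining 8000
  let blocks := List.replicate q.toNat "NOP_REPEAT(8000);"
      ++ (if r > 0 then ["NOP_REPEAT(" ++ PySem.Int.toStr r ++ ");"] else [])
  if blocks = [] then "\n\t"
  else "\n\t" ++ PySem.Str.join "\n\t" blocks ++ "\n\t"

-- ===== PRECONDITION & SPEC =====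
def Spec_emit_nops_py (n : Int) (out : String) : Prop := out = emit_nops_py_alt n
instance (n : Int) (out : String) : Decidable (Spec_emit_nops_py n out) := by unfold Spec_emit_nops_py; infer_instance

-- ===== CLAIM (what is proved, stated in full; the proofs are below) =====
def Claim_equal_emit_nops_py : Prop := ∀ (n : Int), Dom_emit_nops_py n → Spec_emit_nops_py n (emit_nops_py n)

-- ===== LEMMAS AND PROOFS =====
-- B's block list, as a function of the (clamped) count
def altBlocks (m : Int) : List String :=
  List.replicate (PySem.Int.floordiv m 8000).toNat "NOP_REPEAT(8000);"
    ++ (if PySem.Int.mod m 8000 > 0 then ["NOP_REPEAT(" ++ PySem.Int.toStr (PySem.Int.mod m 8000) ++ ");"] else [])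

theorem nopBlock_8000 : nopBlock 8000 = "NOP_REPEAT(8000);" := by decide

theorem emitLoop_eq_altBlocks (m : Int) (hm : 0 ≤ m) (acc : List String) :
    emitLoop acc m = acc ++ altBlocks m := by
  rw [emitLoop]
  split_ifs with h
  · by_cases h8 : 8000 ≤ m
    · have hmin : min m 8000 = (8000 : Int) := by omega
      rw [hmin, emitLoop_eq_altBlocks (m - 8000) (by omega)]
      have hq : PySem.Int.floordiv m 8000 = PySem.Int.floordiv (m - 8000) 8000 + 1 := by
        rw [PySem.Int.floordiv_eq_ediv_of_pos (by omega), PySem.Int.floordiv_eq_ediv_of_pos (by omega)]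
        omega
      have hr : PySem.Int.mod m 8000 = PySem.Int.mod (m - 8000) 8000 := by
        rw [PySem.Int.mod_eq_emod_of_pos (by omega), PySem.Int.mod_eq_emod_of_pos (by omega)]
        omega
      have hq0 : 0 ≤ PySem.Int.floordiv (m - 8000) 8000 := by
        rw [PySem.Int.floordiv_eq_ediv_of_pos (by omega)]; omega
      simp only [altBlocks, hq, hr]
      have : (PySem.Int.floordiv (m - 8000) 8000 + 1).toNat
           = (PySem.Int.floordiv (m - 8000) 8000).toNat + 1 := by omega
      rw [this, List.replicate_succ, nopBlock_8000]
      simp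
    · have hmin : min m 8000 = m := by omega
      rw [hmin, emitLoop]
      have hq : PySem.Int.floordiv m 8000 = 0 := by
        rw [PySem.Int.floordiv_eq_ediv_of_pos (by omega)]; omega
      have hr : PySem.Int.mod m 8000 = m := by
        rw [PySem.Int.mod_eq_emod_of_pos (by omega)]; omega
      simp only [altBlocks, hq, hr, nopBlock, Int.toNat_zero, List.replicate_zero,
        List.nil_append]
      simp [h]
  · have hm0 : m = 0 := by omega
    subst hm0
    simp [altBlocks, PySem.Int.floordiv, PySem.Int.mod]
termination_by m.toNat
decreasing_by omega

theorem emit_nops_py_spec : Claim_equal_emit_nops_py := by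
  intro n _
  unfold Spec_emit_nops_py emit_nops_py emit_nops_py_alt
  rw [emitLoop_eq_altBlocks _ (le_max_left 0 n)]
  simp [altBlocks]
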